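-- pv_equiv track=rewrite | github.com/OOps717/Bachelor | AI/Iris_PW/decisionTree.py | GroupSort2
-- ===== SOURCE A (Python) =====
-- def GroupSort2 (groupQty, group, sorted):
--     '''
--     The same method as the previous but in this case we are considering that groups are not dividing equally
--     groupQty - quantity of groups
--     group - quantity of instances in the group
--     sorted - sorted group of instances to divide
--     '''
--     groupSorted = []
--     k = 0
--     n = 0
--     for i in range(0,groupQty):
--         n += group[i]
--         groupSorted.append(sorted[k:n])
--         k = n
--     return groupSorted
-- ===== SOURCE B (Python) =====
-- def GroupSort2(groupQty, group, sorted):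
--     def chunks(sizes, start):
--         if not sizes:
--             return []
--         if len(sizes) == 1:
--             return [sorted[start:start + sizes[0]]]
--         mid = len(sizes) // 2
--         left = sizes[:mid]
--         return chunks(left, start) + chunks(sizes[mid:], start + sum(left))
--     return chunks(group[:max(groupQty, 0)], 0)
-- ===== Notes on version B (the rewrite author's own statement) =====
-- stated objective: alternative
-- what changed: B is a divide-and-conquer recursion over the first groupQty sizes: it splits the size list in half, recurses on each half with the right half's start offset computed as start + sum(left), and concatenates, instead of A's left-to-right loop over indices with two running cumulative offsets k and n.
import Mathlib
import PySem

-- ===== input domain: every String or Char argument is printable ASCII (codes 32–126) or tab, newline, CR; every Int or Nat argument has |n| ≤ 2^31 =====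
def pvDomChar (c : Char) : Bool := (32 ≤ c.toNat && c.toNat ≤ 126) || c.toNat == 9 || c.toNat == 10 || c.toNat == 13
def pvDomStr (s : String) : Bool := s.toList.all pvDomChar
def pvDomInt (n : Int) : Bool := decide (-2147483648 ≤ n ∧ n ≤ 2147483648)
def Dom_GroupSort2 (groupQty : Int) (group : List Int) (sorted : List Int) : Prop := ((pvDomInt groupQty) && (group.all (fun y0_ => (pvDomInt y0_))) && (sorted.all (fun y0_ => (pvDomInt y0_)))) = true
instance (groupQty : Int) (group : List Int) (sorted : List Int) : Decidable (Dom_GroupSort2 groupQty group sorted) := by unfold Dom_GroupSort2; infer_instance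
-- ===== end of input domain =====

-- B partitions by divide-and-conquer over the size list (right half's offset = start + sum(left))
-- instead of A's left-to-right loop with two running cumulative offsets; objective: alternative
-- (same asymptotic work up to a log factor, genuinely different recursion structure).


-- ===== PORT A =====
def GroupSort2 (groupQty : Int) (group : List Int) (sorted : List Int) : List (List Int) :=
  -- state: (groupSorted, k, n); group[i] is total via getD 0 — Pre_ excludes the IndexError inputs
  (((PySem.List.pyRange 0 groupQty 1).foldl
    (fun (st : List (List Int) × Int × Int) i =>
      let n := st.2.2 + (PySem.List.pyGet? group i).getD 0
      (st.1 ++ [PySem.List.slice sorted (some st.2.1) (some n)], n, n))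
    ([], 0, 0))).1

-- ===== PORT B =====
-- helper chunks(sizes, start) of Source B: divide and conquer on the size list
def pvChunks (sorted : List Int) (sizes : List Int) (start : Int) : List (List Int) :=
  if sizes = [] then []
  else if sizes.length = 1 then
    [PySem.List.slice sorted (some start) (some (start + (PySem.List.pyGet? sizes 0).getD 0))]
  else
    let mid := sizes.length / 2
    let left := PySem.List.slice sizes none (some (mid : Int))
    pvChunks sorted left start ++
      pvChunks sorted (PySem.List.slice sizes (some (mid : Int)) none) (start + left.sum)
termination_by sizes.length
decreasing_by
  · simp only [PySem.List.slice_to_natCast, List.length_take]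
    rename_i h1 h2
    have : sizes.length ≠ 0 := by simpa using h1
    have : sizes.length ≠ 1 := h2
    omega
  · simp only [PySem.List.slice_from_natCast, List.length_drop]
    rename_i h1 h2
    have : sizes.length ≠ 0 := by simpa using h1
    have : sizes.length ≠ 1 := h2
    omega

def GroupSort2_alt (groupQty : Int) (group : List Int) (sorted : List Int) : List (List Int) :=
  -- return chunks(group[:max(groupQty, 0)], 0)
  pvChunks sorted (PySem.List.slice group none (some (max groupQty 0))) 0

-- ===== PRECONDITION & SPEC =====
-- Pre_ excludes exactly the inputs where Python A raises IndexError: groupQty > len(group).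
def Pre_GroupSort2 (groupQty : Int) (group : List Int) (sorted : List Int) : Prop :=
  groupQty ≤ (group.length : Int)
instance (groupQty : Int) (group : List Int) (sorted : List Int) : Decidable (Pre_GroupSort2 groupQty group sorted) := by unfold Pre_GroupSort2; infer_instance

def pvWitness_GroupSort2 : Int × List Int × List Int := (2, ([1, 2], [5, 6, 7, 8]))

def Spec_GroupSort2 (groupQty : Int) (group : List Int) (sorted : List Int) (out : List (List Int)) : Prop := out = GroupSort2_alt groupQty group sorted
instance (groupQty : Int) (group : List Int) (sorted : List Int) (out : List (List Int)) : Decidable (Spec_GroupSort2 groupQty group sorted out) := by unfold Spec_GroupSort2; infer_instance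

-- ===== CLAIM (what is proved, stated in full; the proofs are below) =====
def Claim_equal_GroupSort2 : Prop := ∀ (groupQty : Int) (group : List Int) (sorted : List Int), Dom_GroupSort2 groupQty group sorted → Pre_GroupSort2 groupQty group sorted → Spec_GroupSort2 groupQty group sorted (GroupSort2 groupQty group sorted)

-- ===== LEMMAS AND PROOFS =====

-- group[i] as port A computes it
def gAt (group : List Int) (i : Int) : Int := (PySem.List.pyGet? group i).getD 0

-- the common value, written as the plain left-to-right recursion over the size list
def linSpec (sorted : List Int) (sizes : List Int) (start : Int) : List (List Int) :=
  match sizes with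
  | [] => []
  | s :: t => PySem.List.slice sorted (some start) (some (start + s)) :: linSpec sorted t (start + s)

-- A's slices, indexed over l with a running cumulative offset
def pvSpec (group sorted : List Int) (l : List Int) (n : Int) : List (List Int) :=
  match l with
  | [] => []
  | i :: t => PySem.List.slice sorted (some n) (some (n + gAt group i)) :: pvSpec group sorted t (n + gAt group i)

theorem portA_eq (group sorted : List Int) :
    ∀ (l : List Int) (acc : List (List Int)) (n : Int),
      ((l.foldl
        (fun (st : List (List Int) × Int × Int) i =>
          let m := st.2.2 + (PySem.List.pyGet? group i).getD 0
          (st.1 ++ [PySem.List.slice sorted (some st.2.1) (some m)], m, m))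
        (acc, n, n))).1 = acc ++ pvSpec group sorted l n := by
  intro l
  induction l with
  | nil => intro acc n; simp [pvSpec]
  | cons i t ih =>
    intro acc n
    simp only [List.foldl_cons, pvSpec, ih, gAt]
    simp

theorem pvSpec_eq_linSpec (group sorted : List Int) :
    ∀ (l : List Int) (n : Int), pvSpec group sorted l n = linSpec sorted (l.map (gAt group)) n := by
  intro l
  induction l with
  | nil => intro n; simp [pvSpec, linSpec]
  | cons i t ih => intro n; simp only [pvSpec, List.map_cons, linSpec, ih]

-- the sizes A reads along range(groupQty) are exactly the first groupQty group entries
theorem map_gAt_pyRange (group : List Int) :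
    ∀ (m : Nat), m ≤ group.length →
      (PySem.List.pyRange 0 (m : Int) 1).map (gAt group) = group.take m := by
  intro m
  induction m with
  | zero =>
    intro _
    simp
  | succ m ih =>
    intro hm
    have hcast : ((m + 1 : Nat) : Int) = (m : Int) + 1 := by push_cast; ring
    rw [hcast, PySem.List.pyRange_one_succ_right (by positivity), List.map_append,
        ih (by omega), List.map_singleton]
    have hlt : m < group.length := by omega
    have hg : gAt group (m : Int) = group[m] := by
      simp [gAt, List.getElem?_eq_getElem hlt]
    rw [hg, List.take_add_one, List.getElem?_eq_getElem hlt]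
    rfl

-- splitting the size list splits the partition, shifting the right start by the left total
theorem linSpec_append (sorted : List Int) :
    ∀ (l1 l2 : List Int) (start : Int),
      linSpec sorted (l1 ++ l2) start = linSpec sorted l1 start ++ linSpec sorted l2 (start + l1.sum) := by
  intro l1
  induction l1 with
  | nil => intro l2 start; simp [linSpec]
  | cons s t ih =>
    intro l2 start
    simp only [List.cons_append, linSpec, ih, List.sum_cons]
    rw [show start + (s + t.sum) = start + s + t.sum by ring]

-- the divide-and-conquer helper computes the left-to-right partition
theorem pvChunks_eq (sorted : List Int) :
    ∀ (sizes : List Int) (start : Int), pvChunks sorted sizes start = linSpec sorted sizes start := by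
  intro sizes start
  induction sizes, start using pvChunks.induct with
  | case1 start => simp [pvChunks, linSpec]
  | case2 sizes start h1 h2 =>
    obtain ⟨s, rfl⟩ : ∃ s, sizes = [s] := by
      cases sizes with
      | nil => simp at h2
      | cons a t => cases t with
        | nil => exact ⟨a, rfl⟩
        | cons b u => simp at h2
    rw [pvChunks]
    simp [linSpec]
  | case3 sizes start h1 h2 mid left ih1 ih2 =>
    rw [pvChunks]
    simp only [h1, if_false, h2, if_false]
    rw [ih1, ih2]
    have hl : left = sizes.take mid := PySem.List.slice_to_natCast sizes mid
    have hd : PySem.List.slice sizes (some (mid : Int)) none = sizes.drop mid :=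
      PySem.List.slice_from_natCast sizes mid
    rw [hl, hd, ← linSpec_append sorted _ _ start, List.take_append_drop]

-- ===== VERDICT (by name: the statement is the Claim_ definition above) =====
theorem GroupSort2_spec : Claim_equal_GroupSort2 := by
  intro q group sorted _ hlen
  unfold Pre_GroupSort2 at hlen
  unfold Spec_GroupSort2 GroupSort2 GroupSort2_alt
  rw [portA_eq, List.nil_append, pvSpec_eq_linSpec]
  have hnat : (max q 0).toNat = q.toNat := by omega
  have hmax : PySem.List.slice group none (some (max q 0)) = group.take q.toNat := by
    rw [PySem.List.slice_to group (le_max_right q 0), hnat]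
  rw [hmax, pvChunks_eq]
  by_cases hq : 0 ≤ q
  · have hr : PySem.List.pyRange 0 q 1 = PySem.List.pyRange 0 ((q.toNat : Nat) : Int) 1 := by
      congr 1
      omega
    rw [hr, map_gAt_pyRange group q.toNat (by omega)]
  · rw [PySem.List.pyRange_one_eq_nil (by omega), show q.toNat = 0 by omega]
    simp
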